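-- pv_equiv track=rewrite | github.com/zaurFarm/quba.rent- | fix_website_issues.py | fix_language_links_in_content
-- ===== SOURCE A (Python) =====
-- def fix_language_links_in_content(content, filename):
--     """
--     Исправляет ссылки на языковые версии в контенте.
--     """
--     fixed_content = content
--
--     # Для русских файлов - убеждаемся, что ссылки ведут на русские версии
--     if '-ru' in filename or 'index-ru' in filename:
--         # Заменяем ссылки без языкового суффикса на русские версии
--         replacements = [
--             ('href="/tours.html"', 'href="/tours-ru.html"'),
--             ('href="/blog.html"', 'href="/blog-ru.html"'),
--             ('href="/index.html"', 'href="/ru/"'),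
--             ('href="tours.html"', 'href="tours-ru.html"'),
--             ('href="blog.html"', 'href="blog-ru.html"'),
--             ('href="index.html"', 'href="index-ru.html"'),
--         ]
--
--         for old, new in replacements:
--             if old in fixed_content:
--                 fixed_content = fixed_content.replace(old, new)
--
--     # Для английских файлов
--     elif '-en' in filename or 'index-en' in filename:
--         replacements = [
--             ('href="/tours.html"', 'href="/tours-en.html"'),
--             ('href="/blog.html"', 'href="/blog-en.html"'),
--             ('href="/index.html"', 'href="/en/"'),
--             ('href="tours.html"', 'href="tours-en.html"'),
--             ('href="blog.html"', 'href="blog-en.html"'),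
--             ('href="index.html"', 'href="index-en.html"'),
--         ]
--
--         for old, new in replacements:
--             if old in fixed_content:
--                 fixed_content = fixed_content.replace(old, new)
--
--     # Для арабских файлов
--     elif '-ar' in filename or 'index-ar' in filename:
--         replacements = [
--             ('href="/tours.html"', 'href="/tours-ar.html"'),
--             ('href="/blog.html"', 'href="/blog-ar.html"'),
--             ('href="/index.html"', 'href="/ar/"'),
--             ('href="tours.html"', 'href="tours-ar.html"'),
--             ('href="blog.html"', 'href="blog-ar.html"'),
--             ('href="index.html"', 'href="index-ar.html"'),
--         ]
--
--         for old, new in replacements: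
--             if old in fixed_content:
--                 fixed_content = fixed_content.replace(old, new)
--
--     return fixed_content
-- ===== SOURCE B (Python) =====
-- def fix_language_links_in_content(content, filename):
--     """Single left-to-right scan rewriting href links at each position (instead of six str.replace passes)."""
--     code = None
--     for c in ("ru", "en", "ar"):
--         if "-" + c in filename:
--             code = c
--             break
--     if code is None:
--         return content
--     pages = ("tours", "blog", "index")
--     reps = [(f'href="/{p}.html"',
--              f'href="/{code}/"' if p == "index" else f'href="/{p}-{code}.html"')
--             for p in pages]
--     reps += [(f'href="{p}.html"', f'href="{p}-{code}.html"') for p in pages]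
--     out = []
--     i = 0
--     n = len(content)
--     while i < n:
--         for old, new in reps:
--             if content.startswith(old, i):
--                 out.append(new)
--                 i += len(old)
--                 break
--         else:
--             out.append(content[i])
--             i += 1
--     return "".join(out)
-- ===== Notes on version B (the rewrite author's own statement) =====
-- stated objective: alternative
-- what changed: B resolves the filename to one language code and then rewrites the content in a single left-to-right scan that matches the six href patterns positionally (startswith at each index, emit replacement and skip), instead of A's three duplicated literal tables applied as six guarded full str.replace passes over the content.
import Mathlib
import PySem

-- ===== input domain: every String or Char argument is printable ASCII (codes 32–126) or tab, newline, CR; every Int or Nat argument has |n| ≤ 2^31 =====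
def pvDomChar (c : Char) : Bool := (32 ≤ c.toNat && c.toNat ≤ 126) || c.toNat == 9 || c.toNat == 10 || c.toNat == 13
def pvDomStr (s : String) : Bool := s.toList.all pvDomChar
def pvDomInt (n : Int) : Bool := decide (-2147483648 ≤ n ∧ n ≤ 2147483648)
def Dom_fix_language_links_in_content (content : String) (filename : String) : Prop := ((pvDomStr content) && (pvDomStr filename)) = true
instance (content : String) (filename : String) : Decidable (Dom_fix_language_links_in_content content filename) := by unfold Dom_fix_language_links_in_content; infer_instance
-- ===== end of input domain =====

-- B rewrites the links in ONE left-to-right scan of the content (positional pattern match,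
-- emit replacement, skip) instead of A's six guarded full str.replace passes (objective: alternative).

-- ===== PORT A =====
def pvTableRu : List (String × String) :=
  [("href=\"/tours.html\"", "href=\"/tours-ru.html\""),
   ("href=\"/blog.html\"", "href=\"/blog-ru.html\""),
   ("href=\"/index.html\"", "href=\"/ru/\""),
   ("href=\"tours.html\"", "href=\"tours-ru.html\""),
   ("href=\"blog.html\"", "href=\"blog-ru.html\""),
   ("href=\"index.html\"", "href=\"index-ru.html\"")]

def pvTableEn : List (String × String) :=
  [("href=\"/tours.html\"", "href=\"/tours-en.html\""),
   ("href=\"/blog.html\"", "href=\"/blog-en.html\""),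
   ("href=\"/index.html\"", "href=\"/en/\""),
   ("href=\"tours.html\"", "href=\"tours-en.html\""),
   ("href=\"blog.html\"", "href=\"blog-en.html\""),
   ("href=\"index.html\"", "href=\"index-en.html\"")]

def pvTableAr : List (String × String) :=
  [("href=\"/tours.html\"", "href=\"/tours-ar.html\""),
   ("href=\"/blog.html\"", "href=\"/blog-ar.html\""),
   ("href=\"/index.html\"", "href=\"/ar/\""),
   ("href=\"tours.html\"", "href=\"tours-ar.html\""),
   ("href=\"blog.html\"", "href=\"blog-ar.html\""),
   ("href=\"index.html\"", "href=\"index-ar.html\"")]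

def fix_language_links_in_content (content : String) (filename : String) : String :=
  let fixed_content := content
  if PySem.Str.isIn "-ru" filename || PySem.Str.isIn "index-ru" filename then
    pvTableRu.foldl
      (fun acc p => if PySem.Str.isIn p.1 acc then PySem.Str.replace acc p.1 p.2 else acc)
      fixed_content
  else if PySem.Str.isIn "-en" filename || PySem.Str.isIn "index-en" filename then
    pvTableEn.foldl
      (fun acc p => if PySem.Str.isIn p.1 acc then PySem.Str.replace acc p.1 p.2 else acc)
      fixed_content
  else if PySem.Str.isIn "-ar" filename || PySem.Str.isIn "index-ar" filename then
    pvTableAr.foldl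
      (fun acc p => if PySem.Str.isIn p.1 acc then PySem.Str.replace acc p.1 p.2 else acc)
      fixed_content
  else fixed_content

-- ===== PORT B =====
-- the replacement table built from the single language code (Source B's `reps`)
def pvMakeReps (code : String) : List (List Char × List Char) :=
  (["tours", "blog", "index"].map (fun p =>
    (("href=\"/" ++ p ++ ".html\"").toList,
     (if p == "index" then "href=\"/" ++ code ++ "/\""
      else "href=\"/" ++ p ++ "-" ++ code ++ ".html\"").toList)))
  ++ (["tours", "blog", "index"].map (fun p =>
    (("href=\"" ++ p ++ ".html\"").toList,
     ("href=\"" ++ p ++ "-" ++ code ++ ".html\"").toList)))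

-- Source B's while loop: at each position try the six patterns (startswith), emit the
-- replacement and skip the pattern, otherwise copy one character
def pvScanGo (reps : List (List Char × List Char)) : List Char → List Char
  | [] => []
  | c :: t =>
    match reps.find? (fun p => p.1.isPrefixOf (c :: t)) with
    | some p => p.2 ++ pvScanGo reps (List.drop (p.1.length - 1) t)
    | none => c :: pvScanGo reps t
termination_by l => l.length
decreasing_by
  all_goals simp [List.length_drop]

def fix_language_links_in_content_alt (content : String) (filename : String) : String :=
  match ["ru", "en", "ar"].find? (fun c => PySem.Str.isIn ("-" ++ c) filename) with
  | none => content
  | some code => String.ofList (pvScanGo (pvMakeReps code) content.toList)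

-- ===== PRECONDITION & SPEC =====
def Spec_fix_language_links_in_content (content : String) (filename : String) (out : String) : Prop := out = fix_language_links_in_content_alt content filename
instance (content : String) (filename : String) (out : String) : Decidable (Spec_fix_language_links_in_content content filename out) := by unfold Spec_fix_language_links_in_content; infer_instance

-- ===== CLAIM (what is proved, stated in full; the proofs are below) =====
def Claim_equal_fix_language_links_in_content : Prop := ∀ (content : String) (filename : String), Dom_fix_language_links_in_content content filename → Spec_fix_language_links_in_content content filename (fix_language_links_in_content content filename)

-- ===== LEMMAS AND PROOFS =====

-- one-pattern scan: what a single Python str.replace computes, position by position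
def pvScan1 (o n : List Char) : List Char → List Char
  | [] => []
  | c :: t =>
    if o.isPrefixOf (c :: t) then n ++ pvScan1 o n (List.drop (o.length - 1) t)
    else c :: pvScan1 o n t
termination_by l => l.length
decreasing_by
  all_goals simp [List.length_drop]

theorem pvScan1_nil (o n : List Char) : pvScan1 o n [] = [] := by simp [pvScan1]

theorem pvScan1_pos (o n : List Char) (c : Char) (t : List Char)
    (h : o.isPrefixOf (c :: t) = true) :
    pvScan1 o n (c :: t) = n ++ pvScan1 o n (List.drop (o.length - 1) t) := by
  simp only [pvScan1, h, if_true]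

theorem pvScan1_neg (o n : List Char) (c : Char) (t : List Char)
    (h : o.isPrefixOf (c :: t) = false) :
    pvScan1 o n (c :: t) = c :: pvScan1 o n t := by
  simp only [pvScan1, h, Bool.false_eq_true, if_false]

theorem pvScanGo_cons (reps : List (List Char × List Char)) (c : Char) (t : List Char) :
    pvScanGo reps (c :: t)
      = match reps.find? (fun p => p.1.isPrefixOf (c :: t)) with
        | some p => p.2 ++ pvScanGo reps (List.drop (p.1.length - 1) t)
        | none => c :: pvScanGo reps t := by
  rw [pvScanGo.eq_def]

theorem pv_go_eq_scan1 (o n : List Char) (ho : o ≠ []) :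
    ∀ (fuel : Nat) (l acc : List Char), l.length ≤ fuel →
      PySem.Chars.replace.go o n fuel l acc = acc.reverse ++ pvScan1 o n l := by
  intro fuel
  induction fuel with
  | zero =>
    intro l acc h
    have hl : l = [] := List.eq_nil_of_length_eq_zero (Nat.le_zero.mp h)
    subst hl
    simp [PySem.Chars.replace.go, pvScan1_nil]
  | succ m ih =>
    intro l acc h
    cases l with
    | nil => simp [PySem.Chars.replace.go, pvScan1_nil]
    | cons c t =>
      by_cases hp : o.isPrefixOf (c :: t) = true
      · cases o with
        | nil => exact absurd rfl ho
        | cons o0 ot =>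
          have step : PySem.Chars.replace.go (o0 :: ot) n (m + 1) (c :: t) acc
              = PySem.Chars.replace.go (o0 :: ot) n m (List.drop (o0 :: ot).length (c :: t)) (n.reverse ++ acc) := by
            simp only [PySem.Chars.replace.go, hp, if_true]
          rw [step]
          have hlen : (List.drop (o0 :: ot).length (c :: t)).length ≤ m := by
            simp only [List.length_drop, List.length_cons] at *
            omega
          rw [ih _ _ hlen, pvScan1_pos _ _ _ _ hp]
          simp [List.drop_succ_cons, List.append_assoc]
      · have hpf : o.isPrefixOf (c :: t) = false := Bool.eq_false_iff.mpr hp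
        have step : PySem.Chars.replace.go o n (m + 1) (c :: t) acc
            = PySem.Chars.replace.go o n m t (c :: acc) := by
          simp only [PySem.Chars.replace.go, hpf, Bool.false_eq_true, if_false]
        rw [step, ih t (c :: acc) (by simpa using Nat.le_of_succ_le_succ h), pvScan1_neg _ _ _ _ hpf]
        simp

theorem pv_replace_eq_scan1 (o n l : List Char) (ho : o ≠ []) :
    PySem.Chars.replace l o n = pvScan1 o n l := by
  unfold PySem.Chars.replace
  rw [if_neg (by simpa using ho)]
  simpa using pv_go_eq_scan1 o n ho l.length l [] (le_refl _)

theorem pv_prefix_append_cases {u a b : List Char} (h : u <+: a ++ b) : u <+: a ∨ a <+: u := by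
  obtain ⟨w, hw⟩ := h
  rcases List.append_eq_append_iff.mp hw with ⟨as, ha, _⟩ | ⟨bs, hu, _⟩
  · exact Or.inl ⟨as, ha.symm⟩
  · exact Or.inr ⟨bs, hu.symm⟩

theorem pv_skip (o n : List Char) :
    ∀ (m : Nat) (l : List Char), m ≤ l.length → (∀ p, p < m → ¬ o <+: l.drop p) →
      pvScan1 o n l = l.take m ++ pvScan1 o n (l.drop m) := by
  intro m
  induction m with
  | zero => intro l _ _; simp
  | succ k ih =>
    intro l hlen hno
    cases l with
    | nil => simp at hlen
    | cons c t =>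
      have h0 : ¬ o <+: (c :: t) := by simpa using hno 0 (Nat.succ_pos k)
      have hb : o.isPrefixOf (c :: t) = false :=
        Bool.eq_false_iff.mpr (fun hb => h0 (List.isPrefixOf_iff_prefix.mp hb))
      rw [pvScan1_neg _ _ _ _ hb,
        ih t (by simpa using Nat.le_of_succ_le_succ hlen)
          (fun p hp => by simpa [List.drop_succ_cons] using hno (p + 1) (Nat.succ_lt_succ hp))]
      simp [List.take_succ_cons, List.drop_succ_cons]

theorem pv_scan1_id (o n l : List Char) (h : ∀ p, ¬ o <+: l.drop p) : pvScan1 o n l = l := by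
  rw [pv_skip o n l.length l (le_refl _) (fun p _ => h p)]
  simp [pvScan1_nil]

theorem pv_guarded_step (o n : List Char) (ho : o ≠ []) (l : List Char) :
    (if PySem.Chars.isIn o l then PySem.Chars.replace l o n else l) = pvScan1 o n l := by
  by_cases h : PySem.Chars.isIn o l = true
  · rw [if_pos h, pv_replace_eq_scan1 o n l ho]
  · have hf : PySem.Chars.isIn o l = false := Bool.eq_false_iff.mpr h
    rw [if_neg (by simp [hf])]
    refine (pv_scan1_id o n l ?_).symm
    intro p hp
    have hex : (∃ j, o <+: l.drop j) := ⟨p, hp⟩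
    rw [PySem.Chars.exists_prefix_drop_iff_isIn] at hex
    simp [hf] at hex

def pvFoldScan1 (reps : List (List Char × List Char)) (l : List Char) : List Char :=
  reps.foldl (fun acc p => pvScan1 p.1 p.2 acc) l

theorem pvFoldScan1_cons (r : List Char × List Char) (R : List (List Char × List Char)) (l : List Char) :
    pvFoldScan1 (r :: R) l = pvFoldScan1 R (pvScan1 r.1 r.2 l) := rfl

theorem pvFoldScan1_nil (reps : List (List Char × List Char)) : pvFoldScan1 reps [] = [] := by
  induction reps with
  | nil => rfl
  | cons r R ih => rw [pvFoldScan1_cons, pvScan1_nil]; exact ih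

-- the non-interference facts about a replacement table that make the six sequential
-- replace passes equal to one positional scan
abbrev pvRepsOK (reps : List (List Char × List Char)) : Prop :=
  ∀ p ∈ reps, p.1 ≠ [] ∧
    (∀ u ∈ p.1.tails, u ≠ [] → ∀ q ∈ reps,
      (¬ u <+: q.2 ∧ ¬ q.2 <+: u) ∧
      (¬ (u = p.1 ∧ q.1 = p.1) → ¬ u <+: q.1 ∧ ¬ q.1 <+: u)) ∧
    (∀ u ∈ p.2.tails, u ≠ [] → ∀ q ∈ reps, ¬ u <+: q.1 ∧ ¬ q.1 <+: u)

theorem pv_occ (o n : List Char) (S : List Char → Prop)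
    (Sne : ∀ u, S u → u ≠ [])
    (Sclosed : ∀ c u, S (c :: u) → u ≠ [] → S u)
    (Hn : ∀ u, S u → ¬ u <+: n ∧ ¬ n <+: u) :
    ∀ (l u : List Char), S u → u <+: pvScan1 o n l → u <+: l := by
  intro l
  induction l with
  | nil =>
    intro u hS hp
    rw [pvScan1_nil] at hp
    exact absurd (List.prefix_nil.mp hp) (Sne u hS)
  | cons c t ih =>
    intro u hS hp
    by_cases hpre : o.isPrefixOf (c :: t) = true
    · rw [pvScan1_pos _ _ _ _ hpre] at hp
      rcases pv_prefix_append_cases hp with h1 | h1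
      · exact absurd h1 (Hn u hS).1
      · exact absurd h1 (Hn u hS).2
    · rw [pvScan1_neg _ _ _ _ (Bool.eq_false_iff.mpr hpre)] at hp
      obtain ⟨u0, u', rfl⟩ : ∃ u0 u', u = u0 :: u' := by
        cases u with
        | nil => exact absurd rfl (Sne _ hS)
        | cons a b => exact ⟨a, b, rfl⟩
      rw [List.cons_prefix_cons] at hp
      obtain ⟨rfl, hp'⟩ := hp
      by_cases hu' : u' = []
      · subst hu'
        exact List.cons_prefix_cons.mpr ⟨rfl, List.nil_prefix⟩
      · exact List.cons_prefix_cons.mpr ⟨rfl, ih u' (Sclosed _ _ hS hu') hp'⟩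

theorem pv_occ_pat (R0 : List (List Char × List Char)) (hOK : pvRepsOK R0)
    (r : List Char × List Char) (hr : r ∈ R0) (l u : List Char)
    (hune : u ≠ []) (hsuf : ∃ q ∈ R0, u <:+ q.1) :
    u <+: pvScan1 r.1 r.2 l → u <+: l := by
  refine pv_occ r.1 r.2 (fun v => v ≠ [] ∧ ∃ q ∈ R0, v <:+ q.1)
    (fun v hv => hv.1)
    (fun c v hv hne => ⟨hne, ?_⟩)
    (fun v hv => ?_) l u ⟨hune, hsuf⟩
  · obtain ⟨q, hq, hs⟩ := hv.2
    exact ⟨q, hq, (List.suffix_cons c v).trans hs⟩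
  · obtain ⟨q, hq, hs⟩ := hv.2
    exact ((hOK q hq).2.1 v ((List.mem_tails v q.1).mpr hs) hv.1 r hr).1

theorem pv_fold_cons (R0 : List (List Char × List Char)) (hOK : pvRepsOK R0) :
    ∀ (reps : List (List Char × List Char)), reps ⊆ R0 → ∀ (c : Char) (t : List Char),
      (∀ p ∈ reps, ¬ p.1 <+: (c :: t)) →
      pvFoldScan1 reps (c :: t) = c :: pvFoldScan1 reps t := by
  intro reps
  induction reps with
  | nil => intro _ c t _; rfl
  | cons r R ih =>
    intro hsub c t hno
    have hr : ¬ r.1 <+: (c :: t) := hno r (List.mem_cons_self)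
    have hrb : r.1.isPrefixOf (c :: t) = false :=
      Bool.eq_false_iff.mpr (fun hb => hr (List.isPrefixOf_iff_prefix.mp hb))
    rw [pvFoldScan1_cons, pvFoldScan1_cons, pvScan1_neg _ _ _ _ hrb]
    refine ih (fun x hx => hsub (List.mem_cons_of_mem _ hx)) c (pvScan1 r.1 r.2 t) ?_
    intro p hpR hcon
    have hpR0 : p ∈ R0 := hsub (List.mem_cons_of_mem _ hpR)
    have hrR0 : r ∈ R0 := hsub (List.mem_cons_self)
    have hpo : ¬ p.1 <+: (c :: t) := hno p (List.mem_cons_of_mem _ hpR)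
    have hne : p.1 ≠ [] := (hOK p hpR0).1
    obtain ⟨p0, u, hpu⟩ : ∃ p0 u, p.1 = p0 :: u := by
      cases hc : p.1 with
      | nil => exact absurd hc hne
      | cons a b => exact ⟨a, b, rfl⟩
    rw [hpu, List.cons_prefix_cons] at hcon
    obtain ⟨rfl, hu⟩ := hcon
    by_cases hun : u = []
    · subst hun
      exact hpo (hpu ▸ List.cons_prefix_cons.mpr ⟨rfl, List.nil_prefix⟩)
    · have hu_t : u <+: t :=
        pv_occ_pat R0 hOK r hrR0 t u hun ⟨p, hpR0, hpu ▸ List.suffix_cons p0 u⟩ hu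
      exact hpo (hpu ▸ List.cons_prefix_cons.mpr ⟨rfl, hu_t⟩)

theorem pv_fold_pass :
    ∀ (reps : List (List Char × List Char)) (a : List Char),
      (∀ q ∈ reps, ∀ k, k < a.length → ∀ X : List Char, ¬ q.1 <+: (a.drop k ++ X)) →
      ∀ X, pvFoldScan1 reps (a ++ X) = a ++ pvFoldScan1 reps X := by
  intro reps
  induction reps with
  | nil => intro a _ X; rfl
  | cons r R ih =>
    intro a hblock X
    have h1 : pvScan1 r.1 r.2 (a ++ X) = a ++ pvScan1 r.1 r.2 X := by
      rw [pv_skip r.1 r.2 a.length (a ++ X) (by simp) ?_]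
      · rw [List.take_left, List.drop_left]
      · intro p hp
        rw [List.drop_append_of_le_length (le_of_lt hp)]
        exact hblock r (List.mem_cons_self) p hp X
    rw [pvFoldScan1_cons, h1, pvFoldScan1_cons]
    exact ih a (fun q hq => hblock q (List.mem_cons_of_mem _ hq)) (pvScan1 r.1 r.2 X)

theorem pv_block_old (R0 : List (List Char × List Char)) (hOK : pvRepsOK R0)
    (p q : List Char × List Char) (hp : p ∈ R0) (hq : q ∈ R0) (hne : q.1 ≠ p.1) :
    ∀ k, k < p.1.length → ∀ X : List Char, ¬ q.1 <+: (p.1.drop k ++ X) := by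
  intro k hk X hcon
  have hu_suf : p.1.drop k <:+ p.1 := List.drop_suffix k p.1
  have hu_ne : p.1.drop k ≠ [] := by
    intro h
    have := congrArg List.length h
    simp [List.length_drop] at this
    omega
  have hguard : ¬ (p.1.drop k = p.1 ∧ q.1 = p.1) := fun h => hne h.2
  have hfacts := (((hOK p hp).2.1 (p.1.drop k) ((List.mem_tails _ _).mpr hu_suf) hu_ne q hq).2 hguard)
  rcases pv_prefix_append_cases hcon with h | h
  · exact hfacts.2 h
  · exact hfacts.1 h

theorem pv_block_new (R0 : List (List Char × List Char)) (hOK : pvRepsOK R0)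
    (p q : List Char × List Char) (hp : p ∈ R0) (hq : q ∈ R0) :
    ∀ k, k < p.2.length → ∀ X : List Char, ¬ q.1 <+: (p.2.drop k ++ X) := by
  intro k hk X hcon
  have hu_suf : p.2.drop k <:+ p.2 := List.drop_suffix k p.2
  have hu_ne : p.2.drop k ≠ [] := by
    intro h
    have := congrArg List.length h
    simp [List.length_drop] at this
    omega
  have hfacts := (hOK p hp).2.2 (p.2.drop k) ((List.mem_tails _ _).mpr hu_suf) hu_ne q hq
  rcases pv_prefix_append_cases hcon with h | h
  · exact hfacts.2 h
  · exact hfacts.1 h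

theorem pv_scan1_self (o n Y : List Char) (ho : o ≠ []) :
    pvScan1 o n (o ++ Y) = n ++ pvScan1 o n Y := by
  cases o with
  | nil => exact absurd rfl ho
  | cons c o' =>
    have hpre : (c :: o').isPrefixOf (c :: (o' ++ Y)) = true :=
      List.isPrefixOf_iff_prefix.mpr (List.cons_prefix_cons.mpr ⟨rfl, List.prefix_append o' Y⟩)
    show pvScan1 (c :: o') n (c :: (o' ++ Y)) = n ++ pvScan1 (c :: o') n Y
    rw [pvScan1_pos _ _ _ _ hpre]
    simp

theorem pv_fold_match (R0 : List (List Char × List Char)) (hOK : pvRepsOK R0)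
    (L R : List (List Char × List Char)) (p : List Char × List Char)
    (hsplit : R0 = L ++ p :: R) (X : List Char)
    (hL : ∀ q ∈ L, ¬ q.1 <+: (p.1 ++ X)) :
    pvFoldScan1 R0 (p.1 ++ X) = p.2 ++ pvFoldScan1 R0 X := by
  have hpmem : p ∈ R0 := by rw [hsplit]; simp
  have hone : p.1 ≠ [] := (hOK p hpmem).1
  have hLmem : ∀ q ∈ L, q ∈ R0 := by intro q hq; rw [hsplit]; exact List.mem_append_left _ hq
  have hRmem : ∀ q ∈ R, q ∈ R0 := by
    intro q hq; rw [hsplit]; exact List.mem_append_right _ (List.mem_cons_of_mem _ hq)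
  have hLne : ∀ q ∈ L, q.1 ≠ p.1 := by
    intro q hq h
    exact hL q hq (h ▸ List.prefix_append p.1 X)
  have hLpass : ∀ Y, pvFoldScan1 L (p.1 ++ Y) = p.1 ++ pvFoldScan1 L Y :=
    pv_fold_pass L p.1 (fun q hq => pv_block_old R0 hOK p q hpmem (hLmem q hq) (hLne q hq))
  have hRpass : ∀ Y, pvFoldScan1 R (p.2 ++ Y) = p.2 ++ pvFoldScan1 R Y :=
    pv_fold_pass R p.2 (fun q hq => pv_block_new R0 hOK p q hpmem (hRmem q hq))
  rw [hsplit]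
  show pvFoldScan1 (L ++ p :: R) (p.1 ++ X) = p.2 ++ pvFoldScan1 (L ++ p :: R) X
  simp only [pvFoldScan1, List.foldl_append, List.foldl_cons]
  have e1 : L.foldl (fun acc q => pvScan1 q.1 q.2 acc) (p.1 ++ X)
      = p.1 ++ L.foldl (fun acc q => pvScan1 q.1 q.2 acc) X := hLpass X
  rw [e1, pv_scan1_self p.1 p.2 _ hone]
  exact hRpass _

theorem pv_main (R0 : List (List Char × List Char)) (hOK : pvRepsOK R0) :
    ∀ (N : Nat) (l : List Char), l.length ≤ N → pvFoldScan1 R0 l = pvScanGo R0 l := by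
  intro N
  induction N with
  | zero =>
    intro l h
    have hl : l = [] := List.eq_nil_of_length_eq_zero (Nat.le_zero.mp h)
    subst hl
    rw [pvFoldScan1_nil]
    simp [pvScanGo]
  | succ N ih =>
    intro l hlen
    cases l with
    | nil => rw [pvFoldScan1_nil]; simp [pvScanGo]
    | cons c t =>
      cases hfind : R0.find? (fun p => p.1.isPrefixOf (c :: t)) with
      | none =>
        have hno : ∀ p ∈ R0, ¬ p.1 <+: (c :: t) := by
          intro p hp hcon
          exact (List.find?_eq_none.mp hfind p hp) (List.isPrefixOf_iff_prefix.mpr hcon)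
        rw [pv_fold_cons R0 hOK R0 (fun x hx => hx) c t hno,
          ih t (by simpa using Nat.le_of_succ_le_succ hlen)]
        simp only [pvScanGo_cons, hfind]
      | some p =>
        obtain ⟨hpb, L, R, hsplit, hprev⟩ := List.find?_eq_some_iff_append.mp hfind
        have hpre : p.1 <+: (c :: t) := List.isPrefixOf_iff_prefix.mp hpb
        obtain ⟨X, hX⟩ := hpre
        have hone : p.1 ≠ [] := (hOK p (by rw [hsplit]; simp)).1
        obtain ⟨p0, o', hp1⟩ : ∃ p0 o', p.1 = p0 :: o' := by
          cases hc : p.1 with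
          | nil => exact absurd hc hone
          | cons a b => exact ⟨a, b, rfl⟩
        have hLno : ∀ q ∈ L, ¬ q.1 <+: (p.1 ++ X) := by
          intro q hq hcon
          have := hprev q hq
          rw [hX] at hcon
          simp [List.isPrefixOf_iff_prefix.mpr hcon] at this
        have hmain : pvFoldScan1 R0 (c :: t) = p.2 ++ pvFoldScan1 R0 X := by
          rw [← hX]; exact pv_fold_match R0 hOK L R p hsplit X hLno
        have hXlen : X.length ≤ N := by
          have := congrArg List.length hX
          rw [hp1] at this
          simp at this
          simp at hlen
          omega
        have hXdrop : List.drop (p.1.length - 1) t = X := by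
          have hdl : (p.1 ++ X).drop p.1.length = X := List.drop_left
          rw [hX] at hdl
          rw [hp1] at hdl ⊢
          simpa [List.drop_succ_cons] using hdl
        rw [hmain, ih X hXlen]
        simp only [pvScanGo_cons, hfind]
        rw [hXdrop]

theorem pv_afold_toList (reps : List (String × String)) :
    ∀ (s : String),
      reps.foldl (fun acc p => if PySem.Str.isIn p.1 acc then PySem.Str.replace acc p.1 p.2 else acc) s
        = String.ofList ((reps.map (fun p => (p.1.toList, p.2.toList))).foldl
            (fun acc p => if PySem.Chars.isIn p.1 acc then PySem.Chars.replace acc p.1 p.2 else acc) s.toList) := by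
  induction reps with
  | nil => intro s; simp [String.ofList_toList]
  | cons r R ih =>
    intro s
    simp only [List.foldl_cons, List.map_cons]
    rw [ih (if PySem.Str.isIn r.1 s then PySem.Str.replace s r.1 r.2 else s)]
    congr 1
    by_cases h : PySem.Chars.isIn r.1.toList s.toList = true
    · simp [PySem.Str.isIn_eq, h, PySem.Str.toList_replace]
    · have hf : PySem.Chars.isIn r.1.toList s.toList = false := Bool.eq_false_iff.mpr h
      simp [PySem.Str.isIn_eq, hf]

theorem pv_guarded_fold_eq :
    ∀ (reps : List (List Char × List Char)), (∀ p ∈ reps, p.1 ≠ []) → ∀ (l : List Char),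
      reps.foldl (fun acc p => if PySem.Chars.isIn p.1 acc then PySem.Chars.replace acc p.1 p.2 else acc) l
        = pvFoldScan1 reps l := by
  intro reps
  induction reps with
  | nil => intro _ _; rfl
  | cons r R ih =>
    intro h l
    simp only [List.foldl_cons, pvFoldScan1_cons]
    rw [pv_guarded_step r.1 r.2 (h r (List.mem_cons_self)) l]
    exact ih (fun p hp => h p (List.mem_cons_of_mem _ hp)) _

theorem pv_branch (reps : List (String × String)) (content : String)
    (hOK : pvRepsOK (reps.map (fun p => (p.1.toList, p.2.toList)))) :
    reps.foldl (fun acc p => if PySem.Str.isIn p.1 acc then PySem.Str.replace acc p.1 p.2 else acc) content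
      = String.ofList (pvScanGo (reps.map (fun p => (p.1.toList, p.2.toList))) content.toList) := by
  rw [pv_afold_toList reps content]
  congr 1
  rw [pv_guarded_fold_eq _ (fun p hp => (hOK p hp).1) content.toList]
  exact pv_main _ hOK content.toList.length content.toList (le_refl _)

theorem pv_isIn_sub (a b s : String) (hsub : a.toList <:+: b.toList)
    (h : PySem.Str.isIn a s = false) : PySem.Str.isIn b s = false := by
  by_cases hb : PySem.Str.isIn b s = true
  · exact absurd ((PySem.Str.isIn_iff_infix a s).mpr
      (hsub.trans ((PySem.Str.isIn_iff_infix b s).mp hb))) (ne_true_of_eq_false h)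
  · exact Bool.eq_false_iff.mpr hb

-- ===== VERDICT (by name: the statement is the Claim_ definition above) =====
theorem fix_language_links_in_content_spec : Claim_equal_fix_language_links_in_content := by
  intro content filename _
  unfold Spec_fix_language_links_in_content
  unfold fix_language_links_in_content fix_language_links_in_content_alt
  have aru : ("-" ++ "ru" : String) = "-ru" := rfl
  have aen : ("-" ++ "en" : String) = "-en" := rfl
  have aar : ("-" ++ "ar" : String) = "-ar" := rfl
  by_cases h1 : PySem.Str.isIn "-ru" filename = true
  · simp only [List.find?, aru, h1, Bool.true_or, if_true]
    rw [pv_branch pvTableRu content (by decide)]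
    rw [show (pvTableRu.map (fun p => (p.1.toList, p.2.toList))) = pvMakeReps "ru" from by decide]
  · have h1f : PySem.Str.isIn "-ru" filename = false := Bool.eq_false_iff.mpr h1
    have h1i : PySem.Str.isIn "index-ru" filename = false :=
      pv_isIn_sub "-ru" "index-ru" filename (by decide) h1f
    by_cases h2 : PySem.Str.isIn "-en" filename = true
    · simp only [List.find?, aru, aen, h1f, h1i, h2, Bool.or_self, Bool.false_eq_true,
        if_false, Bool.true_or, if_true]
      rw [pv_branch pvTableEn content (by decide)]
      rw [show (pvTableEn.map (fun p => (p.1.toList, p.2.toList))) = pvMakeReps "en" from by decide]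
    · have h2f : PySem.Str.isIn "-en" filename = false := Bool.eq_false_iff.mpr h2
      have h2i : PySem.Str.isIn "index-en" filename = false :=
        pv_isIn_sub "-en" "index-en" filename (by decide) h2f
      by_cases h3 : PySem.Str.isIn "-ar" filename = true
      · simp only [List.find?, aru, aen, aar, h1f, h1i, h2f, h2i, h3, Bool.or_self,
          Bool.false_eq_true, if_false, Bool.true_or, if_true]
        rw [pv_branch pvTableAr content (by decide)]
        rw [show (pvTableAr.map (fun p => (p.1.toList, p.2.toList))) = pvMakeReps "ar" from by decide]
      · have h3f : PySem.Str.isIn "-ar" filename = false := Bool.eq_false_iff.mpr h3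
        have h3i : PySem.Str.isIn "index-ar" filename = false :=
          pv_isIn_sub "-ar" "index-ar" filename (by decide) h3f
        simp only [List.find?, aru, aen, aar, h1f, h1i, h2f, h2i, h3f, h3i, Bool.or_self,
          Bool.false_eq_true, if_false]
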